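-- pv_equiv track=rewrite | github.com/haoran1224/isi-tkg-icl-main-owner | expand_high_hitory.py | get_entity_edges_in_time_window
-- ===== SOURCE A (Python) =====
-- def get_entity_edges_in_time_window(entity_search_space, entity, anchor_time,
--                                     time_window_size, length):
--     """
--     获取实体在指定时间锚点周围双向时间窗口内的边（二阶四元组）
--
--     参数:
--         entity_search_space: 实体搜索空间字典
--         entity: 目标实体
--         anchor_time: 动态时序锚点
--         time_window_size: 时间窗口大小（向前和向后）
--         length: 要获取的边数
--
--     返回:
--         四元组列表 [[entity, relation, target, time], ...]
--         涉及的关系列表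
--     """
--     if entity not in entity_search_space or length <= 0:
--         return [], []
--
--     quadruples = []
--
--     # 双向时间窗口: [anchor_time - time_window_size, anchor_time + time_window_size]
--     lower_bound = anchor_time - time_window_size
--     upper_bound = anchor_time + time_window_size
--
--     # 遍历实体的所有时间戳
--     for t in entity_search_space[entity]:
--         if t < lower_bound or t > upper_bound:
--             continue
--         # 遍历所有关系
--         for relation in entity_search_space[entity][t]:
--             # 遍历所有目标实体
--             for target in entity_search_space[entity][t][relation]:
--                 quadruples.append([entity, relation, target, t])
--
--     # 按时间从新到旧排序
--     quadruples.sort(key=lambda x: x[3], reverse=True)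
--
--     # 截取前 length 条边
--     selected_quadruples = quadruples[:length]
--
--     # 从截取后的四元组中提取关系集合
--     relations = set()
--     for quad in selected_quadruples:
--         relations.add(quad[1])
--
--     return selected_quadruples, list(relations)
-- ===== SOURCE B (Python) =====
-- def get_entity_edges_in_time_window(entity_search_space, entity, anchor_time,
--                                     time_window_size, length):
--     # B: sort only the in-window timestamps (newest first), expand them in order
--     # and stop early once `length` quadruples are gathered; relations are the set of
--     # relation ids of the selection. Same result, no full-list sort.
--     if entity not in entity_search_space or length <= 0:
--         return [], []
--     tdict = entity_search_space[entity]
--     lo = anchor_time - time_window_size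
--     hi = anchor_time + time_window_size
--     times = sorted((t for t in tdict if lo <= t <= hi), reverse=True)
--     selected = []
--     for t in times:
--         if len(selected) >= length:
--             break
--         selected.extend([entity, relation, target, t]
--                         for relation in tdict[t]
--                         for target in tdict[t][relation])
--     del selected[length:]
--     relations = list({q[1] for q in selected})
--     return selected, relations
-- ===== Notes on version B (the rewrite author's own statement) =====
-- stated objective: alternative
-- what changed: Instead of materialising every in-window quadruple and stably sorting the whole quadruple list by time, B sorts only the in-window timestamp keys descending, expands them newest-first and breaks out of the loop as soon as `length` quadruples are gathered; the relation set is then built from the selection.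
import Mathlib
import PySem

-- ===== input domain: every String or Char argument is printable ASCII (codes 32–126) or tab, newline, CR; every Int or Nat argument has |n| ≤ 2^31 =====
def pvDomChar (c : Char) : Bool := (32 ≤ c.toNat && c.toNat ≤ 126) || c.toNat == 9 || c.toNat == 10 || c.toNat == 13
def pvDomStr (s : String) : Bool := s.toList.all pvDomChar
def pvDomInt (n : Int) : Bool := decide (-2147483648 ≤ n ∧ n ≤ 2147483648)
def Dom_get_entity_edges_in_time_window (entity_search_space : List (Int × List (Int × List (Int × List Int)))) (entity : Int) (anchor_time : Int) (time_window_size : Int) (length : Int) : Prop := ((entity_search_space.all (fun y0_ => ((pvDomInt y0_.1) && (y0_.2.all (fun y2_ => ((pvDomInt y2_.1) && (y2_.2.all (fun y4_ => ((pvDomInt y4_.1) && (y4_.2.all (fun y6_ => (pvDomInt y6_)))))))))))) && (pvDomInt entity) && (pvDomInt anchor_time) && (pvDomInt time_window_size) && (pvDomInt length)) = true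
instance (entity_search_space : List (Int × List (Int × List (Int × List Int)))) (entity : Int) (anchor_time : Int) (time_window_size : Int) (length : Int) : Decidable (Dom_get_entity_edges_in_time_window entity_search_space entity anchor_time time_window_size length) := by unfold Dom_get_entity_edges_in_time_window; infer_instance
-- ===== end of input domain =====

-- B sorts only the in-window timestamps (newest first), expands them in order with an
-- early break once `length` quadruples are gathered, instead of materialising and
-- stably sorting every quadruple; same return value.

-- ===== PORT A =====
def get_entity_edges_in_time_window (entity_search_space : List (Int × List (Int × List (Int × List Int)))) (entity : Int) (anchor_time : Int) (time_window_size : Int) (length : Int) : List (List Int) × List Int :=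
  if ((PySem.Dict.mk entity_search_space).get? entity).isNone || decide (length ≤ 0) then ([], [])
  else
    let lower := anchor_time - time_window_size
    let upper := anchor_time + time_window_size
    let d := (PySem.Dict.mk entity_search_space).getD entity []
    let quadruples := (d.map Prod.fst).foldl (fun acc t =>
      if decide (t < lower) || decide (upper < t) then acc
      else (((PySem.Dict.mk d).getD t []).map Prod.fst).foldl (fun acc2 r =>
        ((PySem.Dict.mk ((PySem.Dict.mk d).getD t [])).getD r []).foldl
          (fun acc3 tg => acc3 ++ [[entity, r, tg, t]]) acc2) acc) []
    let sortedQ := PySem.List.sorted quadruples (fun x => PySem.List.pyGetD x 3 0) true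
    let selected := PySem.List.slice sortedQ none (some length)
    let relations := selected.foldl (fun s q => PySem.Set.add s (PySem.List.pyGetD q 1 0)) PySem.Set.empty
    (selected, relations)

-- ===== PORT B =====
-- one in-window timestamp expanded to its quadruples (the extend-comprehension in Source B)
def pvB_block (d : List (Int × List (Int × List Int))) (entity t : Int) : List (List Int) :=
  (((PySem.Dict.mk d).getD t []).map Prod.fst).flatMap (fun r =>
    ((PySem.Dict.mk ((PySem.Dict.mk d).getD t [])).getD r []).map (fun tg => [entity, r, tg, t]))

-- the for-loop over the sorted timestamps with the early break
def pvB_gather (d : List (Int × List (Int × List Int))) (entity len : Int) : List Int → List (List Int) → List (List Int)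
  | [], sel => sel
  | t :: ts, sel =>
    if decide (len ≤ (sel.length : Int)) then sel
    else pvB_gather d entity len ts (sel ++ pvB_block d entity t)

def get_entity_edges_in_time_window_alt (entity_search_space : List (Int × List (Int × List (Int × List Int)))) (entity : Int) (anchor_time : Int) (time_window_size : Int) (length : Int) : List (List Int) × List Int :=
  if ((PySem.Dict.mk entity_search_space).get? entity).isNone || decide (length ≤ 0) then ([], [])
  else
    let d := (PySem.Dict.mk entity_search_space).getD entity []
    let lo := anchor_time - time_window_size
    let hi := anchor_time + time_window_size
    let times := PySem.List.sorted ((d.map Prod.fst).filter (fun t => decide (lo ≤ t) && decide (t ≤ hi))) (fun x => x) true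
    let selected := PySem.List.slice (pvB_gather d entity length times []) none (some length)
    let relations := PySem.Set.ofList (selected.map (fun q => PySem.List.pyGetD q 1 0))
    (selected, relations)

-- ===== PRECONDITION & SPEC =====
def Spec_get_entity_edges_in_time_window (entity_search_space : List (Int × List (Int × List (Int × List Int)))) (entity : Int) (anchor_time : Int) (time_window_size : Int) (length : Int) (out : List (List Int) × List Int) : Prop := out = get_entity_edges_in_time_window_alt entity_search_space entity anchor_time time_window_size length
instance (entity_search_space : List (Int × List (Int × List (Int × List Int)))) (entity : Int) (anchor_time : Int) (time_window_size : Int) (length : Int) (out : List (List Int) × List Int) : Decidable (Spec_get_entity_edges_in_time_window entity_search_space entity anchor_time time_window_size length out) := by unfold Spec_get_entity_edges_in_time_window; infer_instance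

-- ===== CLAIM (what is proved, stated in full; the proofs are below) =====
def Claim_equal_get_entity_edges_in_time_window : Prop := ∀ (entity_search_space : List (Int × List (Int × List (Int × List Int)))) (entity : Int) (anchor_time : Int) (time_window_size : Int) (length : Int), Dom_get_entity_edges_in_time_window entity_search_space entity anchor_time time_window_size length → Spec_get_entity_edges_in_time_window entity_search_space entity anchor_time time_window_size length (get_entity_edges_in_time_window entity_search_space entity anchor_time time_window_size length)

-- ===== LEMMAS AND PROOFS =====

-- the descending stable insertion used by `sorted … true`, with an Int-valued key
def pvInsQ {β : Type} (key : β → Int) (q : β) (vs : List β) : List β :=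
  PySem.List.insertBy (fun a b => decide (key b < key a)) q vs

def pvInsT (t : Int) (us : List Int) : List Int :=
  PySem.List.insertBy (fun a b => decide (b < a)) t us

theorem pv_key_block (d : List (Int × List (Int × List Int))) (e t : Int) :
    ∀ q ∈ pvB_block d e t, PySem.List.pyGetD q 3 0 = t := by
  intro q hq
  simp only [pvB_block, List.mem_flatMap, List.mem_map] at hq
  obtain ⟨r, -, tg, -, rfl⟩ := hq
  rfl

theorem pv_flatMap_single {α β : Type} (f : α → β) (l : List α) :
    l.flatMap (fun x => [f x]) = l.map f := by
  induction l with
  | nil => rfl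
  | cons x l ih => simp [ih]

theorem pv_foldl_if_append {α β : Type} (p : α → Bool) (g : α → List β) :
    ∀ (l : List α) (acc : List β),
      l.foldl (fun acc t => if p t then acc else acc ++ g t) acc
        = acc ++ (l.filter (fun t => !p t)).flatMap g := by
  intro l
  induction l with
  | nil => intro acc; simp
  | cons x l ih =>
    intro acc
    by_cases hx : p x = true <;> simp [List.foldl_cons, hx, ih]

theorem pvA_inner (d : List (Int × List (Int × List Int))) (e t : Int) (acc : List (List Int)) :
    (((PySem.Dict.mk d).getD t []).map Prod.fst).foldl (fun acc2 r =>
        ((PySem.Dict.mk ((PySem.Dict.mk d).getD t [])).getD r []).foldl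
          (fun acc3 tg => acc3 ++ [[e, r, tg, t]]) acc2) acc
      = acc ++ pvB_block d e t := by
  unfold pvB_block
  simp only [PySem.List.foldl_append_eq_flatMap]
  congr 1
  apply List.flatMap_congr
  intro r _
  exact pv_flatMap_single _ _

theorem pv_insertBy_append {α : Type} (before : α → α → Bool) (x : α) :
    ∀ (done old : List α), (∀ y ∈ done, before x y = false) →
      PySem.List.insertBy before x (done ++ old) = done ++ PySem.List.insertBy before x old := by
  intro done
  induction done with
  | nil => intro old _; simp
  | cons y done ih =>
    intro old h
    have hy : before x y = false := h y (by simp)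
    simp only [List.cons_append, PySem.List.insertBy, hy, Bool.false_eq_true, if_false]
    rw [show PySem.List.insertBy before x (done ++ old)
          = done ++ PySem.List.insertBy before x old from ih old (fun z hz => h z (by simp [hz]))]

theorem pv_foldl_ins_append {β : Type} (key : β → Int) (t : Int) :
    ∀ (bs done acc : List β), (∀ y ∈ done, ¬ key y < t) → (∀ q ∈ bs, key q = t) →
      bs.foldl (fun a q => pvInsQ key q a) (done ++ acc)
        = done ++ bs.foldl (fun a q => pvInsQ key q a) acc := by
  intro bs
  induction bs with
  | nil => intro done acc _ _; simp
  | cons b bs ih =>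
    intro done acc hd hb
    have hbt : key b = t := hb b (by simp)
    have h1 : pvInsQ key b (done ++ acc) = done ++ pvInsQ key b acc := by
      apply pv_insertBy_append
      intro y hy
      have := hd y hy
      simp only [decide_eq_false_iff_not]
      omega
    simp only [List.foldl_cons, h1]
    exact ih done _ hd (fun q hq => hb q (by simp [hq]))

theorem pv_insMany {β : Type} (key : β → Int) (t : Int) :
    ∀ (bs done old : List β), (∀ y ∈ done, ¬ key y < t) → (∀ q ∈ bs, key q = t) →
      (∀ y ∈ old, key y < t) →
      bs.foldl (fun a q => pvInsQ key q a) (done ++ old) = done ++ bs ++ old := by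
  intro bs
  induction bs with
  | nil => intro done old _ _ _; simp
  | cons b bs ih =>
    intro done old hd hb ho
    have hbt : key b = t := hb b (by simp)
    have h1 : pvInsQ key b (done ++ old) = (done ++ [b]) ++ old := by
      unfold pvInsQ
      rw [pv_insertBy_append _ _ done old
        (by intro y hy; have := hd y hy; simp only [decide_eq_false_iff_not]; omega)]
      cases old with
      | nil => simp [PySem.List.insertBy]
      | cons z zs =>
        have hz : key z < key b := by rw [hbt]; exact ho z (by simp)
        simp [PySem.List.insertBy, hz]
    simp only [List.foldl_cons]
    rw [show pvInsQ key b (done ++ old) = (done ++ [b]) ++ old from h1]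
    rw [ih (done ++ [b]) old
      (by intro y hy; simp only [List.mem_append, List.mem_singleton] at hy
          rcases hy with hy | rfl
          · exact hd y hy
          · omega)
      (fun q hq => hb q (by simp [hq])) ho]
    simp

theorem pv_pairwise_insT (t : Int) :
    ∀ us : List Int, us.Pairwise (fun a b => b ≤ a) →
      (pvInsT t us).Pairwise (fun a b => b ≤ a) := by
  intro us
  induction us with
  | nil => intro _; simp [pvInsT, PySem.List.insertBy]
  | cons u us ih =>
    intro h
    rw [List.pairwise_cons] at h
    by_cases hu : u < t
    · have h2 : pvInsT t (u :: us) = t :: u :: us := by simp [pvInsT, PySem.List.insertBy, hu]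
      rw [h2]
      refine List.Pairwise.cons ?_ (List.Pairwise.cons h.1 h.2)
      intro y hy
      simp only [List.mem_cons] at hy
      rcases hy with rfl | hy
      · omega
      · have := h.1 y hy; omega
    · have h2 : pvInsT t (u :: us) = u :: pvInsT t us := by simp [pvInsT, PySem.List.insertBy, hu]
      rw [h2]
      refine List.Pairwise.cons ?_ (ih h.2)
      intro y hy
      rw [pvInsT, PySem.List.mem_insertBy] at hy
      rcases hy with rfl | hy
      · omega
      · exact h.1 y hy

theorem pv_insBlock {β : Type} (key : β → Int) (block : Int → List β)
    (hk : ∀ t q, q ∈ block t → key q = t) (t : Int) :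
    ∀ us : List Int, us.Pairwise (fun a b => b ≤ a) →
      (block t).foldl (fun a q => pvInsQ key q a) (us.flatMap block)
        = (pvInsT t us).flatMap block := by
  intro us
  induction us with
  | nil =>
    intro _
    have h2 : pvInsT t [] = [t] := by simp [pvInsT, PySem.List.insertBy]
    rw [h2]
    have := pv_insMany key t (block t) [] [] (by simp) (fun q hq => hk t q hq) (by simp)
    simpa using this
  | cons u us ih =>
    intro h
    rw [List.pairwise_cons] at h
    by_cases hu : u < t
    · have h2 : pvInsT t (u :: us) = t :: u :: us := by simp [pvInsT, PySem.List.insertBy, hu]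
      rw [h2]
      have hold : ∀ y ∈ (u :: us).flatMap block, key y < t := by
        intro y hy
        simp only [List.mem_flatMap] at hy
        obtain ⟨v, hv, hyv⟩ := hy
        have hkv : key y = v := hk v y hyv
        simp only [List.mem_cons] at hv
        rcases hv with rfl | hv
        · omega
        · have := h.1 v hv; omega
      have := pv_insMany key t (block t) [] ((u :: us).flatMap block) (by simp)
        (fun q hq => hk t q hq) hold
      simpa using this
    · have h2 : pvInsT t (u :: us) = u :: pvInsT t us := by simp [pvInsT, PySem.List.insertBy, hu]
      rw [h2]
      have hsplit : (u :: us).flatMap block = block u ++ us.flatMap block := by simp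
      rw [hsplit]
      rw [pv_foldl_ins_append key t (block t) (block u) (us.flatMap block)
        (by intro y hy; have : key y = u := hk u y hy; omega) (fun q hq => hk t q hq)]
      rw [ih h.2]
      simp

theorem pv_sort_flatMap {β : Type} (key : β → Int) (block : Int → List β)
    (hk : ∀ t q, q ∈ block t → key q = t) (ts : List Int) :
    PySem.List.sorted (ts.flatMap block) key true
      = (PySem.List.sorted ts (fun x => x) true).flatMap block := by
  have master : ∀ (l : List Int) (us : List Int), us.Pairwise (fun a b => b ≤ a) →
      (l.flatMap block).foldl (fun a q => pvInsQ key q a) (us.flatMap block)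
        = (l.foldl (fun a t => pvInsT t a) us).flatMap block := by
    intro l
    induction l with
    | nil => intro us _; simp
    | cons t l ih =>
      intro us h
      have hsplit : ((t :: l).flatMap block) = block t ++ l.flatMap block := by simp
      rw [hsplit, List.foldl_append, pv_insBlock key block hk t us h, List.foldl_cons]
      exact ih (pvInsT t us) (pv_pairwise_insT t us h)
  have hm := master ts [] (by simp)
  simp only [List.flatMap_nil] at hm
  rw [PySem.List.sorted_rev_eq_foldl_insertBy (ts.flatMap block) key,
      PySem.List.sorted_rev_eq_foldl_insertBy ts (fun x => x)]
  simpa [pvInsQ, pvInsT] using hm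

theorem pv_gather_take (d : List (Int × List (Int × List Int))) (e len : Int) (n : Nat)
    (hn : (n : Int) ≤ len) :
    ∀ (us : List Int) (sel : List (List Int)),
      (sel ++ us.flatMap (pvB_block d e)).take n = (pvB_gather d e len us sel).take n := by
  intro us
  induction us with
  | nil => intro sel; simp [pvB_gather]
  | cons t us ih =>
    intro sel
    simp only [pvB_gather]
    by_cases hb : len ≤ (sel.length : Int)
    · have hns : n ≤ sel.length := by omega
      simp only [hb, decide_true, if_true]
      rw [List.take_append_of_le_length hns]
    · simp only [hb, decide_false]
      rw [if_neg Bool.false_ne_true]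
      rw [← ih (sel ++ pvB_block d e t)]
      simp

theorem pv_set_fold_eq_dedup (sel : List (List Int)) :
    sel.foldl (fun s q => PySem.Set.add s (PySem.List.pyGetD q 1 0)) PySem.Set.empty
      = PySem.Set.ofList (sel.map (fun q => PySem.List.pyGetD q 1 0)) := by
  rw [PySem.Set.ofList_eq_foldl, List.foldl_map]
  rfl

theorem pv_main (entity_search_space : List (Int × List (Int × List (Int × List Int)))) (entity : Int) (anchor_time : Int) (time_window_size : Int) (length : Int) :
    get_entity_edges_in_time_window entity_search_space entity anchor_time time_window_size length
      = get_entity_edges_in_time_window_alt entity_search_space entity anchor_time time_window_size length := by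
  simp only [get_entity_edges_in_time_window, get_entity_edges_in_time_window_alt]
  by_cases hg : (((PySem.Dict.mk entity_search_space).get? entity).isNone || decide (length ≤ 0)) = true
  · rw [if_pos hg, if_pos hg]
  · rw [if_neg hg, if_neg hg]
    have hlen : 0 < length := by
      simp only [Bool.or_eq_true, decide_eq_true_eq, Option.isNone_iff_eq_none] at hg
      omega
    set d := (PySem.Dict.mk entity_search_space).getD entity [] with hd
    -- A's quadruple loop is the flatMap of the blocks over the filtered timestamps
    have hA : (d.map Prod.fst).foldl (fun acc t =>
        if decide (t < anchor_time - time_window_size) || decide (anchor_time + time_window_size < t) then acc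
        else (((PySem.Dict.mk d).getD t []).map Prod.fst).foldl (fun acc2 r =>
          ((PySem.Dict.mk ((PySem.Dict.mk d).getD t [])).getD r []).foldl
            (fun acc3 tg => acc3 ++ [[entity, r, tg, t]]) acc2) acc) []
        = ((d.map Prod.fst).filter (fun t =>
            decide (anchor_time - time_window_size ≤ t) && decide (t ≤ anchor_time + time_window_size))).flatMap
            (pvB_block d entity) := by
      simp only [pvA_inner]
      rw [pv_foldl_if_append]
      simp only [List.nil_append]
      congr 1
      apply List.filter_congr
      intro t _
      by_cases h1 : t < anchor_time - time_window_size <;>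
        by_cases h2 : anchor_time + time_window_size < t <;>
          simp [h1, h2] <;> omega
    rw [hA]
    set ts := (d.map Prod.fst).filter (fun t =>
      decide (anchor_time - time_window_size ≤ t) && decide (t ≤ anchor_time + time_window_size)) with hts
    rw [pv_sort_flatMap _ (pvB_block d entity) (pv_key_block d entity) ts]
    set times := PySem.List.sorted ts (fun x => x) true with htimes
    have hsel : PySem.List.slice (times.flatMap (pvB_block d entity)) none (some length)
        = PySem.List.slice (pvB_gather d entity length times []) none (some length) := by
      rw [PySem.List.slice_to _ (le_of_lt hlen), PySem.List.slice_to _ (le_of_lt hlen)]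
      have := pv_gather_take d entity length length.toNat
        (by rw [Int.toNat_of_nonneg (le_of_lt hlen)]) times []
      simpa using this
    rw [hsel, pv_set_fold_eq_dedup]

-- ===== VERDICT (by name: the statement is the Claim_ definition above) =====
theorem get_entity_edges_in_time_window_spec : Claim_equal_get_entity_edges_in_time_window := by
  intro ess e at_ tw len _
  unfold Spec_get_entity_edges_in_time_window
  exact pv_main ess e at_ tw len
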